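-- pv_equiv track=rewrite | github.com/R3AL3RAn0n25/r3al3rai.com | AI_Core_Worker/personalization_engine.py | _infer_skill_level
-- ===== SOURCE A (Python) =====
-- def _infer_skill_level(queries, tools):
--     """Infer user skill level from behavior"""
--
--     beginner_keywords = ['tutorial', 'how to', 'basics', 'introduction', 'guide', 'simple']
--     intermediate_keywords = ['advanced', 'technique', 'method', 'custom', 'configure']
--     expert_keywords = ['exploit', 'bypass', 'reverse', 'assembly', 'kernel', 'zero-day']
--
--     beginner_count = sum(1 for q in queries if any(kw in q.lower() for kw in beginner_keywords))
--     intermediate_count = sum(1 for q in queries if any(kw in q.lower() for kw in intermediate_keywords))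
--     expert_count = sum(1 for q in queries if any(kw in q.lower() for kw in expert_keywords))
--
--     # Tool complexity indicator
--     advanced_tools = sum(1 for t in tools if t.get('usage_count', 0) > 5)
--
--     total = beginner_count + intermediate_count + expert_count + advanced_tools
--     if total == 0:
--         return 'beginner'
--
--     if expert_count > intermediate_count or advanced_tools > 10:
--         return 'expert'
--     elif intermediate_count > beginner_count or advanced_tools > 5:
--         return 'intermediate'
--     else:
--         return 'beginner'
-- ===== SOURCE B (Python) =====
-- def _infer_skill_level(queries, tools):
--     """Infer user skill level from behavior.
--
--     Instead of keeping three absolute counts, keep only the two signed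
--     differences the decision ladder compares (expert-intermediate and
--     intermediate-beginner) plus a flag recording whether any query matched
--     any tier at all; this is exactly the state the final decision needs.
--     """
--     beginner_keywords = ['tutorial', 'how to', 'basics', 'introduction', 'guide', 'simple']
--     intermediate_keywords = ['advanced', 'technique', 'method', 'custom', 'configure']
--     expert_keywords = ['exploit', 'bypass', 'reverse', 'assembly', 'kernel', 'zero-day']
--
--     d_exp_int = 0      # expert_count - intermediate_count
--     d_int_beg = 0      # intermediate_count - beginner_count
--     matched = False    # did any query match any tier?
--     for q in queries:
--         ql = q.lower()
--         b = any(kw in ql for kw in beginner_keywords)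
--         i = any(kw in ql for kw in intermediate_keywords)
--         e = any(kw in ql for kw in expert_keywords)
--         d_exp_int += e - i
--         d_int_beg += i - b
--         matched = matched or b or i or e
--
--     advanced_tools = len([t for t in tools if t.get('usage_count', 0) > 5])
--
--     if not matched and advanced_tools == 0:
--         return 'beginner'
--     if d_exp_int > 0 or advanced_tools > 10:
--         return 'expert'
--     if d_int_beg > 0 or advanced_tools > 5:
--         return 'intermediate'
--     return 'beginner'
-- ===== Notes on version B (the rewrite author's own statement) =====
-- stated objective: alternative
-- what changed: B never maintains the three absolute tier counts A computes in three passes: one loop accumulates only the two signed differences (expert-intermediate, intermediate-beginner) and a boolean 'matched anything' flag -- exactly the state the decision ladder inspects -- and gets advanced_tools as the length of a filtered list; correctness because A's 'total==0' test equals 'no query matched any tier and no advanced tool' (all counts are nonnegative) and each comparison count_x > count_y equals the accumulated difference being positive.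
import Mathlib
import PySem

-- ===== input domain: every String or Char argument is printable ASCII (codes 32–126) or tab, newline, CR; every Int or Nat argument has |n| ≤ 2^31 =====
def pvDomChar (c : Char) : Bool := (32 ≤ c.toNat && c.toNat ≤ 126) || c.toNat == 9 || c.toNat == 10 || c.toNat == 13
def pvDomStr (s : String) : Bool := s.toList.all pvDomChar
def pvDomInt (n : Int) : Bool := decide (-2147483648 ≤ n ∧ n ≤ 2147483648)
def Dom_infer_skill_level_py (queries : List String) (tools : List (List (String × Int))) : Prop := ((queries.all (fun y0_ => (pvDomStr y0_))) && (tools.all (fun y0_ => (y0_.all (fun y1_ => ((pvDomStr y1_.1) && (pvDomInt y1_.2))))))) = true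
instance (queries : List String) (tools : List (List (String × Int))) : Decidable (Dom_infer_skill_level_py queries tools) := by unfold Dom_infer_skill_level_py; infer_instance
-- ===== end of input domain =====

-- B keeps only the two signed count-differences and a 'matched anything' flag instead of
-- A's three absolute counts (objective: alternative decomposition, same cost).

-- ===== PORT A =====
def pvBeginnerKw : List String := ["tutorial", "how to", "basics", "introduction", "guide", "simple"]
def pvIntermediateKw : List String := ["advanced", "technique", "method", "custom", "configure"]
def pvExpertKw : List String := ["exploit", "bypass", "reverse", "assembly", "kernel", "zero-day"]

-- any(kw in q.lower() for kw in kws)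
def pvMatches (kws : List String) (q : String) : Bool :=
  kws.any (fun kw => PySem.Str.isIn kw (PySem.Str.lower q))

-- t.get('usage_count', 0) > 5
def pvAdvTool (t : List (String × Int)) : Bool :=
  PySem.Dict.getD (PySem.Dict.mk t) "usage_count" 0 > 5

def infer_skill_level_py (queries : List String) (tools : List (List (String × Int))) : String :=
  let beginner_count : Int := (queries.map (fun q => if pvMatches pvBeginnerKw q then (1 : Int) else 0)).sum
  let intermediate_count : Int := (queries.map (fun q => if pvMatches pvIntermediateKw q then (1 : Int) else 0)).sum
  let expert_count : Int := (queries.map (fun q => if pvMatches pvExpertKw q then (1 : Int) else 0)).sum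
  let advanced_tools : Int := (tools.map (fun t => if pvAdvTool t then (1 : Int) else 0)).sum
  let total := beginner_count + intermediate_count + expert_count + advanced_tools
  if total = 0 then "beginner"
  else if expert_count > intermediate_count || advanced_tools > 10 then "expert"
  else if intermediate_count > beginner_count || advanced_tools > 5 then "intermediate"
  else "beginner"

-- ===== PORT B =====
-- one loop: state = (expert-intermediate difference, intermediate-beginner difference, matched flag)
def pvStepB (acc : Int × Int × Bool) (q : String) : Int × Int × Bool :=
  let ql := PySem.Str.lower q
  let b := pvBeginnerKw.any (fun kw => PySem.Str.isIn kw ql)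
  let i := pvIntermediateKw.any (fun kw => PySem.Str.isIn kw ql)
  let e := pvExpertKw.any (fun kw => PySem.Str.isIn kw ql)
  (acc.1 + ((if e then (1 : Int) else 0) - (if i then 1 else 0)),
   acc.2.1 + ((if i then (1 : Int) else 0) - (if b then 1 else 0)),
   acc.2.2 || b || i || e)

def infer_skill_level_py_alt (queries : List String) (tools : List (List (String × Int))) : String :=
  let st := queries.foldl pvStepB (0, 0, false)
  let advanced_tools : Int :=
    ((tools.filter (fun t => PySem.Dict.getD (PySem.Dict.mk t) "usage_count" 0 > 5)).length : Int)
  if st.2.2 = false ∧ advanced_tools = 0 then "beginner"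
  else if st.1 > 0 ∨ advanced_tools > 10 then "expert"
  else if st.2.1 > 0 ∨ advanced_tools > 5 then "intermediate"
  else "beginner"

-- ===== PRECONDITION & SPEC =====
def Spec_infer_skill_level_py (queries : List String) (tools : List (List (String × Int))) (out : String) : Prop := out = infer_skill_level_py_alt queries tools
instance (queries : List String) (tools : List (List (String × Int))) (out : String) : Decidable (Spec_infer_skill_level_py queries tools out) := by unfold Spec_infer_skill_level_py; infer_instance

-- ===== CLAIM (what is proved, stated in full; the proofs are below) =====
def Claim_equal_infer_skill_level_py : Prop := ∀ (queries : List String) (tools : List (List (String × Int))), Dom_infer_skill_level_py queries tools → Spec_infer_skill_level_py queries tools (infer_skill_level_py queries tools)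

-- ===== LEMMAS AND PROOFS =====

def pvCnt (kws : List String) (queries : List String) : Int :=
  (queries.map (fun q => if pvMatches kws q then (1 : Int) else 0)).sum

theorem pvCnt_nonneg (kws queries : List String) : 0 ≤ pvCnt kws queries := by
  induction queries with
  | nil => simp [pvCnt]
  | cons q qs ih =>
    simp only [pvCnt, List.map_cons, List.sum_cons] at *
    split <;> omega

theorem pvCnt_zero_iff (kws queries : List String) :
    pvCnt kws queries = 0 ↔ queries.all (fun q => !pvMatches kws q) = true := by
  induction queries with
  | nil => simp [pvCnt]
  | cons q qs ih =>
    have h := pvCnt_nonneg kws qs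
    simp only [pvCnt, List.map_cons, List.sum_cons, List.all_cons, Bool.and_eq_true] at *
    cases hq : pvMatches kws q
    · simp [ih]
    · simp only [Bool.not_true, if_true]
      constructor
      · intro h0; omega
      · rintro ⟨h0, -⟩; simp at h0

theorem pvStepB_foldl (queries : List String) (d1 d2 : Int) (m : Bool) :
    queries.foldl pvStepB (d1, d2, m) =
      (d1 + (pvCnt pvExpertKw queries - pvCnt pvIntermediateKw queries),
       d2 + (pvCnt pvIntermediateKw queries - pvCnt pvBeginnerKw queries),
       m || queries.any (fun q => pvMatches pvBeginnerKw q || pvMatches pvIntermediateKw q || pvMatches pvExpertKw q)) := by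
  induction queries generalizing d1 d2 m with
  | nil => simp [pvCnt]
  | cons q qs ih =>
    simp only [List.foldl_cons, List.any_cons]
    rw [show pvStepB (d1, d2, m) q =
        (d1 + ((if pvMatches pvExpertKw q then (1 : Int) else 0) - (if pvMatches pvIntermediateKw q then 1 else 0)),
         d2 + ((if pvMatches pvIntermediateKw q then (1 : Int) else 0) - (if pvMatches pvBeginnerKw q then 1 else 0)),
         m || (pvMatches pvBeginnerKw q || pvMatches pvIntermediateKw q || pvMatches pvExpertKw q)) from by
      simp only [pvStepB, pvMatches, Prod.mk.injEq]
      exact ⟨rfl, rfl, by cases m <;> simp [Bool.or_assoc]⟩]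
    rw [ih]
    simp only [pvCnt, List.map_cons, List.sum_cons, Prod.mk.injEq]
    refine ⟨by ring, by ring, by cases m <;> simp [Bool.or_assoc]⟩

theorem pvAdv_filter (tools : List (List (String × Int))) :
    ((tools.filter (fun t => PySem.Dict.getD (PySem.Dict.mk t) "usage_count" 0 > 5)).length : Int) =
      (tools.map (fun t => if pvAdvTool t then (1 : Int) else 0)).sum := by
  induction tools with
  | nil => simp
  | cons t ts ih =>
    simp only [List.filter_cons, List.map_cons, List.sum_cons, pvAdvTool]
    split <;> simp_all [pvAdvTool] <;> omega

theorem pvAdv_nonneg (tools : List (List (String × Int))) :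
    0 ≤ (tools.map (fun t => if pvAdvTool t then (1 : Int) else 0)).sum := by
  induction tools with
  | nil => simp
  | cons t ts ih => simp only [List.map_cons, List.sum_cons]; split <;> omega

-- the decision ladders agree, given the counts' signs and the meaning of the flag
theorem pvDecision_eq (B I E A : Int) (anyM : Bool)
    (hB : 0 ≤ B) (hI : 0 ≤ I) (hE : 0 ≤ E) (hA : 0 ≤ A)
    (hAny : anyM = false ↔ (B = 0 ∧ I = 0 ∧ E = 0)) :
    (if B + I + E + A = 0 then "beginner"
     else if E > I || A > 10 then "expert"
     else if I > B || A > 5 then "intermediate"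
     else "beginner") =
    (if (false || anyM) = false ∧ A = 0 then "beginner"
     else if (0 : Int) + (E - I) > 0 ∨ A > 10 then "expert"
     else if (0 : Int) + (I - B) > 0 ∨ A > 5 then "intermediate"
     else "beginner") := by
  cases anyM with
  | false =>
    obtain ⟨h1, h2, h3⟩ := hAny.mp rfl
    subst h1; subst h2; subst h3
    simp only [Bool.false_or]
    split_ifs <;>
      first
        | rfl
        | (simp only [Bool.or_eq_true, decide_eq_true_eq, not_or, Bool.not_eq_true,
            decide_eq_false_iff_not, not_lt, gt_iff_lt, not_and] at *; omega)
  | true =>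
    have hne : ¬ (B = 0 ∧ I = 0 ∧ E = 0) := fun h => Bool.noConfusion (hAny.mpr h)
    clear hAny
    simp only [Bool.false_or]
    split_ifs <;>
      first
        | rfl
        | (simp only [Bool.or_eq_true, decide_eq_true_eq, not_or, Bool.not_eq_true,
            decide_eq_false_iff_not, not_lt, gt_iff_lt, not_and, Bool.true_eq_false,
            false_and, not_false_iff] at *; omega)
        | (simp only [Bool.or_eq_true, decide_eq_true_eq, not_or, Bool.not_eq_true,
            decide_eq_false_iff_not, not_lt, gt_iff_lt, not_and, Bool.true_eq_false,
            false_and, not_false_iff] at *)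

-- ===== VERDICT (by name: the statement is the Claim_ definition above) =====
theorem infer_skill_level_py_spec : Claim_equal_infer_skill_level_py := by
  intro queries tools _
  show infer_skill_level_py queries tools = infer_skill_level_py_alt queries tools
  unfold infer_skill_level_py infer_skill_level_py_alt
  rw [pvStepB_foldl, pvAdv_filter]
  have hAny : (queries.any (fun q => pvMatches pvBeginnerKw q || pvMatches pvIntermediateKw q || pvMatches pvExpertKw q) = false)
      ↔ (pvCnt pvBeginnerKw queries = 0 ∧ pvCnt pvIntermediateKw queries = 0 ∧ pvCnt pvExpertKw queries = 0) := by
    rw [pvCnt_zero_iff, pvCnt_zero_iff, pvCnt_zero_iff]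
    simp only [List.all_eq_true, List.any_eq_false, Bool.or_eq_true, not_or,
      Bool.not_eq_true, Bool.not_eq_true']
    constructor
    · intro h
      exact ⟨fun q hq => ((h q hq).1.1), fun q hq => ((h q hq).1.2), fun q hq => ((h q hq).2)⟩
    · rintro ⟨h1, h2, h3⟩ q hq; exact ⟨⟨h1 q hq, h2 q hq⟩, h3 q hq⟩
  exact pvDecision_eq _ _ _ _ _
    (pvCnt_nonneg pvBeginnerKw queries) (pvCnt_nonneg pvIntermediateKw queries)
    (pvCnt_nonneg pvExpertKw queries) (pvAdv_nonneg tools) hAny
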